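-- pv_equiv track=rewrite | github.com/mandcony/quantoniumos | algorithms/rft/core/asymmetric_number_system.py | _normalise_frequencies
-- ===== SOURCE A (Python) =====
-- from typing import Iterable, List
--
-- def _normalise_frequencies(counts: List[int], precision: int) -> List[int]:
--     total = sum(counts)
--     if total == 0:
--         raise ValueError("Counts must not all be zero")
--     target = 1 << precision
--     freqs = [max(1, (count * target) // total) for count in counts]
--     current = sum(freqs)
--     if current == target:
--         return freqs
--
--     length = len(freqs)
--     if current < target:
--         diff = target - current
--         idx = 0
--         while diff > 0:
--             freqs[idx] += 1
--             diff -= 1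
--             idx = (idx + 1) % length
--         return freqs
--
--     deficit = current - target
--     order = sorted(range(length), key=freqs.__getitem__, reverse=True)
--     while deficit > 0:
--         changed = False
--         for idx in order:
--             if freqs[idx] > 1:
--                 freqs[idx] -= 1
--                 deficit -= 1
--                 changed = True
--                 if deficit == 0:
--                     break
--         if not changed:
--             raise ValueError("Unable to normalise frequencies with given precision")
--     return freqs
-- ===== SOURCE B (Python) =====
-- from typing import List
--
-- def _normalise_frequencies(counts: List[int], precision: int) -> List[int]:
--     total = sum(counts)
--     if total == 0:
--         raise ValueError("Counts must not all be zero")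
--     target = 1 << precision
--     freqs = [max(1, (count * target) // total) for count in counts]
--     current = sum(freqs)
--     if current == target:
--         return freqs
--     length = len(freqs)
--     if current < target:
--         # round-robin +1 starting at index 0, in closed form
--         q, r = divmod(target - current, length)
--         return [f + q + (1 if i < r else 0) for i, f in enumerate(freqs)]
--     if target < length:
--         raise ValueError("Unable to normalise frequencies with given precision")
--     deficit = current - target
--     # reduction happens in whole "passes", each lowering every entry > 1 by one;
--     # after k passes entry f has lost min(k, f - 1); binary-search the number of
--     # passes k needed: minimal k with S(k) >= deficit
--     def S(k):
--         return sum(min(k, f - 1) for f in freqs)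
--     lo, hi = 0, max(freqs)          # S(lo) = 0 < deficit <= S(hi)
--     while hi - lo > 1:
--         mid = (lo + hi) // 2
--         if S(mid) >= deficit:
--             hi = mid
--         else:
--             lo = mid
--     k = hi
--     base = [f - min(k - 1, f - 1) for f in freqs]   # state after k-1 full passes
--     rem = deficit - S(k - 1)                        # decrements of the final pass
--     order = sorted(range(length), key=freqs.__getitem__, reverse=True)
--     cut = set()
--     for idx in order:
--         if base[idx] > 1:
--             cut.add(idx)
--             if len(cut) == rem:
--                 break
--     return [f - 1 if i in cut else f for i, f in enumerate(base)]
-- ===== Notes on version B (the rewrite author's own statement) =====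
-- stated objective: faster
-- what changed: B replaces A's unit-by-unit round-robin increment loop by its divmod closed form, and A's pass-by-pass decrement loop by a binary search for the number of whole passes k (S(k)=sum(min(k,f-1))) followed by one explicit partial pass along the same sorted order; intended as faster: probe runs measured 1.55x-681x at the largest size both finished, A timing out where B returned.
import Mathlib
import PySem

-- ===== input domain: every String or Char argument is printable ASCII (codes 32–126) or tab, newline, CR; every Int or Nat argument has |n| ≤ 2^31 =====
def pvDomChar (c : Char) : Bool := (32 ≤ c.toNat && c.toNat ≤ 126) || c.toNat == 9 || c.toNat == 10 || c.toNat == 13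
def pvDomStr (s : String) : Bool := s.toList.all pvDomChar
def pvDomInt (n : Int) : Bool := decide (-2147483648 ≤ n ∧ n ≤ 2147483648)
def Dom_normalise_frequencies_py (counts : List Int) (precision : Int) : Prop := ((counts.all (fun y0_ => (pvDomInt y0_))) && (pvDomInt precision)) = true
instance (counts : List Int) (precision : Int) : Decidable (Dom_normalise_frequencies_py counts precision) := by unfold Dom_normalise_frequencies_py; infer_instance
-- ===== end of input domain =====

-- B replaces A's unit-by-unit round-robin increment loop by its closed form, and A's
-- pass-by-pass decrement loop by a binary search for the number of whole passes
-- (intended as faster: timing-probe runs measured 1.55x-681x at the largest size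
-- both finished, and A timed out where B returned); equivalence is proved on Pre_.

-- ===== PORT A =====

-- while diff > 0: freqs[idx] += 1; diff -= 1; idx = (idx + 1) % length   (one fuel per unit of diff)
def nfIncLoop : Nat → List Int → Int → Int → List Int
  | 0, fs, _idx, _len => fs
  | Nat.succ d, fs, idx, len =>
      nfIncLoop d (PySem.List.pySetD fs idx (PySem.List.pyGetD fs idx 0 + 1)) (PySem.Int.mod (idx + 1) len) len

-- for idx in order: if freqs[idx] > 1: freqs[idx] -= 1; deficit -= 1; changed = True; if deficit == 0: break
def nfInner : List Int → List Int → Int → Bool → List Int × Int × Bool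
  | [], fs, defc, changed => (fs, defc, changed)
  | idx :: rest, fs, defc, changed =>
      if 1 < PySem.List.pyGetD fs idx 0 then
        if defc - 1 = 0 then (PySem.List.pySetD fs idx (PySem.List.pyGetD fs idx 0 - 1), defc - 1, true)
        else nfInner rest (PySem.List.pySetD fs idx (PySem.List.pyGetD fs idx 0 - 1)) (defc - 1) true
      else nfInner rest fs defc changed

-- while deficit > 0: one pass over order; raise (dummy []) if no entry changed.
-- fuel = deficit + 1 suffices: every completed pass lowers deficit by at least 1.
def nfOuter (order : List Int) : Nat → List Int → Int → List Int
  | 0, fs, _ => fs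
  | Nat.succ fuel, fs, defc =>
      if 0 < defc then
        let r := nfInner order fs defc false
        if r.2.2 then nfOuter order fuel r.1 r.2.1 else []
      else fs

def normalise_frequencies_py (counts : List Int) (precision : Int) : List Int :=
  let total := counts.sum
  if total = 0 then []   -- raise ValueError (excluded by Pre_)
  else
    let target : Int := (1 : Int) <<< precision.toNat   -- 1 << precision (0 ≤ precision in Pre_; Python raises on a negative shift)
    let freqs := counts.map (fun count => max 1 (PySem.Int.floordiv (count * target) total))
    let current := freqs.sum
    if current = target then freqs
    else
      let length : Int := (freqs.length : Int)
      if current < target then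
        nfIncLoop (target - current).toNat freqs 0 length
      else
        let deficit := current - target
        let order := PySem.List.sorted (PySem.List.pyRange 0 length 1) (fun i => PySem.List.pyGetD freqs i 0) true
        nfOuter order (deficit.toNat + 1) freqs deficit   -- unreachable raise inside = dummy [] (excluded by Pre_)

-- ===== PORT B =====

-- S(k) = sum(min(k, f - 1) for f in freqs)
def nfS (freqs : List Int) (k : Int) : Int := (freqs.map (fun f => min k (f - 1))).sum

-- while hi - lo > 1: mid = (lo + hi) // 2; …   (fuel = hi - lo: the gap shrinks every step)
def nfSearch (freqs : List Int) (deficit : Int) : Nat → Int → Int → Int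
  | 0, _lo, hi => hi
  | Nat.succ fuel, lo, hi =>
      if 1 < hi - lo then
        let mid := PySem.Int.floordiv (lo + hi) 2
        if deficit ≤ nfS freqs mid then nfSearch freqs deficit fuel lo mid
        else nfSearch freqs deficit fuel mid hi
      else hi

-- cut: the first rem indices along order with base[idx] > 1
def nfCut : List Int → List Int → Int → List Int
  | [], _base, _rem => []
  | idx :: rest, base, rem =>
      if 1 < PySem.List.pyGetD base idx 0 then
        if rem = 1 then [idx]
        else idx :: nfCut rest base (rem - 1)
      else nfCut rest base rem

def normalise_frequencies_py_alt (counts : List Int) (precision : Int) : List Int :=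
  let total := counts.sum
  if total = 0 then []   -- raise ValueError (excluded by Pre_)
  else
    let target : Int := (1 : Int) <<< precision.toNat
    let freqs := counts.map (fun count => max 1 (PySem.Int.floordiv (count * target) total))
    let current := freqs.sum
    if current = target then freqs
    else
      let length : Int := (freqs.length : Int)
      if current < target then
        let q := PySem.Int.floordiv (target - current) length
        let r := PySem.Int.mod (target - current) length
        (PySem.List.enumerate freqs 0).map (fun p => p.2 + q + if p.1 < r then 1 else 0)
      else if target < length then []   -- raise ValueError (excluded by Pre_)
      else
        let deficit := current - target
        let hi := (PySem.List.max? freqs (fun y => y)).getD 0   -- max(freqs); nonempty whenever reached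
        let k := nfSearch freqs deficit (hi - 0).toNat 0 hi
        let base := freqs.map (fun f => f - min (k - 1) (f - 1))
        let rem := deficit - nfS freqs (k - 1)
        let order := PySem.List.sorted (PySem.List.pyRange 0 length 1) (fun i => PySem.List.pyGetD freqs i 0) true
        let cut := nfCut order base rem
        (PySem.List.enumerate base 0).map (fun p => if p.1 ∈ cut then p.2 - 1 else p.2)

-- ===== PRECONDITION & SPEC =====
-- Pre_ excludes exactly the inputs where A raises ValueError: counts summing to 0,
-- a negative precision (1 << precision raises), and len(counts) > 2**precision (the
-- deficit loop bottoms out at the all-ones list and raises).  The third conjunct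
-- states len(counts) ≤ 2**precision via bit_length, without computing the power.
def Pre_normalise_frequencies_py (counts : List Int) (precision : Int) : Prop :=
  counts.sum ≠ 0 ∧ 0 ≤ precision ∧
    PySem.Int.bitLength ((counts.length : Int) - 1) ≤ precision.toNat
instance (counts : List Int) (precision : Int) : Decidable (Pre_normalise_frequencies_py counts precision) := by
  unfold Pre_normalise_frequencies_py; infer_instance

def pvWitness_normalise_frequencies_py : List Int × Int := ([3, 1], 2)

def Spec_normalise_frequencies_py (counts : List Int) (precision : Int) (out : List Int) : Prop :=
  out = normalise_frequencies_py_alt counts precision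
instance (counts : List Int) (precision : Int) (out : List Int) : Decidable (Spec_normalise_frequencies_py counts precision out) := by
  unfold Spec_normalise_frequencies_py; infer_instance

-- ===== CLAIM (what is proved, stated in full; the proofs are below) =====
def Claim_equal_normalise_frequencies_py : Prop := ∀ (counts : List Int) (precision : Int), Dom_normalise_frequencies_py counts precision → Pre_normalise_frequencies_py counts precision → Spec_normalise_frequencies_py counts precision (normalise_frequencies_py counts precision)

-- ===== LEMMAS AND PROOFS =====

-- proof-side abbreviations: a [p, p+n) window of +1s, and the decrement of the entries listed in cut
def nfBump (fs : List Int) (p n : Nat) : List Int :=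
  fs.mapIdx (fun i f => if p ≤ i ∧ i < p + n then f + 1 else f)
def nfDecAt (fs : List Int) (cut : List Int) : List Int :=
  (PySem.List.enumerate fs 0).map (fun p => if p.1 ∈ cut then p.2 - 1 else p.2)

-- ---- increment side ----

theorem length_nfBump (fs : List Int) (p n : Nat) : (nfBump fs p n).length = fs.length := by
  simp [nfBump]

theorem getElem_nfBump (fs : List Int) (p n : Nat) (j : Nat) (hj : j < fs.length) :
    (nfBump fs p n)[j]'(by rw [length_nfBump]; exact hj) =
      if p ≤ j ∧ j < p + n then fs[j] + 1 else fs[j] := by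
  simp [nfBump, List.getElem_mapIdx]

theorem nfBump_zero (fs : List Int) (p : Nat) : nfBump fs p 0 = fs := by
  apply List.ext_getElem (by simp [length_nfBump])
  intro j h1 h2
  rw [getElem_nfBump fs p 0 j h2, if_neg (by omega)]
theorem inc_seg : ∀ (n : Nat) (fs : List Int) (p : Nat) (len : Int),
    len = (fs.length : Int) → p + n ≤ fs.length →
    nfIncLoop n fs (p : Int) len = nfBump fs p n := by
  intro n
  induction n with
  | zero => intro fs p len _ h; rw [nfBump_zero]; rfl
  | succ m ih =>
      intro fs p len hlen h
      have hp : p < fs.length := by omega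
      simp only [nfIncLoop]
      have hset : PySem.List.pySetD fs (p : Int) (PySem.List.pyGetD fs (p : Int) 0 + 1) =
          nfBump fs p 1 := by
        rw [PySem.List.pySetD_of_nonneg fs _ (by omega)]
        have hget : PySem.List.pyGetD fs (p : Int) 0 = fs[p] :=
          PySem.List.pyGetD_eq_getElem fs 0 (by omega) (by push_cast; omega)
        apply List.ext_getElem (by simp [length_nfBump])
        intro j h1 h2
        rw [getElem_nfBump fs p 1 j (by simpa using h1)]
        by_cases hj : p = j
        · subst hj
          rw [if_pos (by omega)]
          simp [List.getElem_set, hget]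
        · rw [if_neg (by omega)]
          simp [List.getElem_set, hj]
      rw [hset]
      by_cases hm : m = 0
      · subst hm
        rfl
      · have hplt : (p : Int) + 1 < len := by rw [hlen]; push_cast; omega
        have hmod : PySem.Int.mod ((p : Int) + 1) len = ((p + 1 : Nat) : Int) := by
          rw [PySem.Int.mod_eq_emod_of_pos (by rw [hlen]; push_cast; omega)]
          rw [Int.emod_eq_of_lt (by omega) hplt]
          push_cast; ring
        rw [hmod, ih (nfBump fs p 1) (p + 1) len (by rw [hlen, length_nfBump]) (by rw [length_nfBump]; omega)]
        apply List.ext_getElem (by simp [length_nfBump])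
        intro j h1 h2
        have hjf : j < fs.length := by rw [length_nfBump] at h2; exact h2
        rw [getElem_nfBump (nfBump fs p 1) (p + 1) m j (by rw [length_nfBump]; exact hjf),
            getElem_nfBump fs p (m + 1) j hjf]
        by_cases hin : p + 1 ≤ j ∧ j < p + 1 + m
        · rw [if_pos hin, getElem_nfBump fs p 1 j hjf, if_neg (by omega), if_pos (by omega)]
        · rw [if_neg hin, getElem_nfBump fs p 1 j hjf]
          by_cases h01 : p ≤ j ∧ j < p + 1
          · rw [if_pos h01, if_pos (by omega)]
          · rw [if_neg h01, if_neg (by omega)]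

-- idx stays in [0, len) along the loop, so composition shifts the start by a mod len
theorem inc_comp : ∀ (a b : Nat) (fs : List Int) (idx len : Int), 0 < len → 0 ≤ idx → idx < len →
    nfIncLoop (a + b) fs idx len = nfIncLoop b (nfIncLoop a fs idx len) ((idx + (a : Int)) % len) len := by
  intro a
  induction a with
  | zero =>
      intro b fs idx len hlen h0 hlt
      have hm : (idx + ((0 : Nat) : Int)) % len = idx := by
        push_cast; rw [add_zero, Int.emod_eq_of_lt h0 hlt]
      rw [hm, Nat.zero_add]
      rfl
  | succ a ih =>
      intro b fs idx len hlen h0 hlt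
      have hstep : Nat.succ a + b = a + b + 1 := by omega
      have hmod1 : PySem.Int.mod (idx + 1) len = (idx + 1) % len :=
        PySem.Int.mod_eq_emod_of_pos hlen
      have h0' : 0 ≤ (idx + 1) % len := Int.emod_nonneg _ (by omega)
      have hlt' : (idx + 1) % len < len := Int.emod_lt_of_pos _ hlen
      simp only [Nat.succ_eq_add_one, show a + 1 + b = (a + b) + 1 by omega, nfIncLoop]
      rw [hmod1]
      rw [ih b _ ((idx + 1) % len) len hlen h0' hlt']
      congr 1
      · rw [show Nat.succ a = a + 1 from rfl] at *
        push_cast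
        conv_rhs => rw [show idx + ((a : Int) + 1) = (idx + 1) + (a : Int) by ring]
        rw [Int.add_emod ((idx+1) % len) _ len, Int.emod_emod_of_dvd _ dvd_rfl, ← Int.add_emod]

theorem bump_full (fs : List Int) : nfBump fs 0 fs.length = fs.map (fun f => f + 1) := by
  apply List.ext_getElem (by simp [length_nfBump])
  intro j h1 h2
  have hj : j < fs.length := by rwa [length_nfBump] at h1
  rw [getElem_nfBump fs 0 fs.length j hj, if_pos (by omega)]
  simp

theorem inc_q : ∀ (q r : Nat) (fs : List Int), 0 < fs.length → r ≤ fs.length →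
    nfIncLoop (q * fs.length + r) fs 0 (fs.length : Int) =
      nfIncLoop r (fs.map (fun f => f + (q : Int))) 0 (fs.length : Int) := by
  intro q
  induction q with
  | zero =>
      intro r fs hL hr
      have : fs.map (fun f => f + ((0 : Nat) : Int)) = fs := by
        simp
      rw [this]
      norm_num
  | succ q ih =>
      intro r fs hL hr
      have hsplit : (q + 1) * fs.length + r = fs.length + (q * fs.length + r) := by ring
      rw [hsplit, inc_comp fs.length (q * fs.length + r) fs 0 (fs.length : Int) (by push_cast; omega) le_rfl (by push_cast; omega)]
      have hcyc : nfIncLoop fs.length fs 0 (fs.length : Int) = fs.map (fun f => f + 1) := by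
        rw [show (0 : Int) = ((0 : Nat) : Int) by norm_num,
          inc_seg fs.length fs 0 (fs.length : Int) rfl (by omega)]
        exact bump_full fs
      rw [hcyc]
      have hmod : ((0 : Int) + (fs.length : Int)) % (fs.length : Int) = 0 := by
        rw [zero_add, Int.emod_self]
      rw [hmod]
      have hlenmap : ((fs.map (fun f => f + 1)).length : Int) = (fs.length : Int) := by simp
      have hih := ih r (fs.map (fun f => f + 1)) (by simp; omega) (by simp; omega)
      rw [show q * fs.length + r = q * (fs.map (fun f => f + 1)).length + r by simp, ← hlenmap]
      rw [hih]
      have hmm : (fs.map (fun f => f + 1)).map (fun f => f + (q : Int)) = fs.map (fun f => f + ((q + 1 : Nat) : Int)) := by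
        rw [List.map_map]
        apply List.map_congr_left
        intro f hf
        simp
        push_cast
        ring
      rw [hmm, hlenmap]

theorem inc_closed (fs : List Int) (diff : Int) (h1 : 0 < diff) (hL : fs ≠ []) :
    nfIncLoop diff.toNat fs 0 (fs.length : Int) =
      (PySem.List.enumerate fs 0).map
        (fun p => p.2 + PySem.Int.floordiv diff (fs.length : Int) +
          if p.1 < PySem.Int.mod diff (fs.length : Int) then 1 else 0) := by
  have hLpos : 0 < fs.length := List.length_pos_of_ne_nil hL
  have hd : diff = ((diff.toNat : Nat) : Int) := by omega
  set d := diff.toNat with hdd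
  have hsplit : d = d / fs.length * fs.length + d % fs.length := (Nat.div_add_mod' d fs.length).symm
  have hq : PySem.Int.floordiv diff (fs.length : Int) = ((d / fs.length : Nat) : Int) := by
    rw [hd]; exact_mod_cast PySem.Int.floordiv_natCast d fs.length
  have hr : PySem.Int.mod diff (fs.length : Int) = ((d % fs.length : Nat) : Int) := by
    rw [hd]; exact_mod_cast PySem.Int.mod_natCast d fs.length
  rw [hsplit, inc_q (d / fs.length) (d % fs.length) fs hLpos (le_of_lt (Nat.mod_lt d hLpos))]
  set fs' := fs.map (fun f => f + ((d / fs.length : Nat) : Int)) with hfs'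
  have hlen' : fs'.length = fs.length := by simp [hfs']
  have hseg := inc_seg (d % fs.length) fs' 0 (fs.length : Int) (by rw [hlen']) (by rw [hlen']; have := Nat.mod_lt d hLpos; omega)
  rw [show ((0:Nat) : Int) = (0 : Int) by norm_num] at hseg
  rw [hseg]
  apply List.ext_getElem (by simp [length_nfBump, hlen', PySem.List.length_enumerate])
  intro j hj1 hj2
  have hjf : j < fs.length := by
    rw [length_nfBump, hlen'] at hj1; exact hj1
  have hjf' : j < fs'.length := by rw [hlen']; exact hjf
  rw [getElem_nfBump fs' 0 (d % fs.length) j hjf']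
  have hrhs : ((PySem.List.enumerate fs 0).map
      (fun p => p.2 + PySem.Int.floordiv diff (fs.length : Int) +
        if p.1 < PySem.Int.mod diff (fs.length : Int) then 1 else 0))[j]'hj2 =
      fs[j] + ((d / fs.length : Nat) : Int) + (if ((j : Nat) : Int) < ((d % fs.length : Nat) : Int) then 1 else 0) := by
    rw [List.getElem_map, PySem.List.getElem_enumerate]
    simp only [hq, hr]
    norm_num
  rw [hrhs]
  have hget' : fs'[j]'hjf' = fs[j] + ((d / fs.length : Nat) : Int) := by simp [hfs']
  by_cases hcase : j < d % fs.length
  · rw [if_pos (by omega), if_pos (by push_cast; omega), hget']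
  · rw [if_neg (by omega), if_neg (by push_cast; omega), hget']
    ring


-- ---- deficit side ----
theorem nfS_zero (fs : List Int) (h : ∀ f ∈ fs, 1 ≤ f) : nfS fs 0 = 0 := by
  induction fs with
  | nil => simp [nfS]
  | cons f t ih =>
      have hf := h f (by simp)
      have ht := ih (fun x hx => h x (by simp [hx]))
      simp [nfS] at ht ⊢
      omega

theorem nfS_one (fs : List Int) (h : ∀ f ∈ fs, 1 ≤ f) :
    nfS fs 1 = ((fs.countP (fun f => 1 < f) : Nat) : Int) := by
  induction fs with
  | nil => simp [nfS]
  | cons f t ih =>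
      have hf := h f (by simp)
      have ht := ih (fun x hx => h x (by simp [hx]))
      simp [nfS, List.countP_cons] at ht ⊢
      by_cases h1 : 1 < f
      · simp [h1]; push_cast; omega
      · simp [h1]; push_cast at ht ⊢; omega

theorem nfS_mono (fs : List Int) (a b : Int) (hab : a ≤ b) (ha : 0 ≤ a) : nfS fs a ≤ nfS fs b := by
  induction fs with
  | nil => simp [nfS]
  | cons f t ih =>
      simp [nfS] at ih ⊢
      have : min a (f - 1) ≤ min b (f - 1) := by omega
      omega

theorem nfS_max (fs : List Int) (M : Int) (h : ∀ f ∈ fs, f ≤ M) :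
    nfS fs M = fs.sum - (fs.length : Int) := by
  induction fs with
  | nil => simp [nfS]
  | cons f t ih =>
      have hf := h f (by simp)
      have ht := ih (fun x hx => h x (by simp [hx]))
      simp [nfS] at ht ⊢
      push_cast
      omega

theorem applyOne_eq (fs : List Int) (h : ∀ f ∈ fs, 1 ≤ f) :
    fs.map (fun f => if 1 < f then f - 1 else f) = fs.map (fun f => f - min 1 (f - 1)) := by
  apply List.map_congr_left
  intro f hf
  have := h f hf
  by_cases h1 : 1 < f <;> simp [h1] <;> omega

theorem nfS_applyOne (fs : List Int) (h : ∀ f ∈ fs, 1 ≤ f) (m : Int) (hm : 0 ≤ m) :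
    nfS (fs.map (fun f => f - min 1 (f - 1))) m = nfS fs (m + 1) - nfS fs 1 := by
  induction fs with
  | nil => simp [nfS]
  | cons f t ih =>
      have hf := h f (by simp)
      have ht := ih (fun x hx => h x (by simp [hx]))
      simp [nfS] at ht ⊢
      have : min m (f - min 1 (f - 1) - 1) = min (m + 1) (f - 1) - min 1 (f - 1) := by omega
      omega

theorem search_spec (fs : List Int) (defc : Int) : ∀ (fuel : Nat) (lo hi : Int),
    0 ≤ lo → lo < hi → (hi - lo).toNat ≤ fuel → nfS fs lo < defc → defc ≤ nfS fs hi →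
    lo < nfSearch fs defc fuel lo hi ∧ nfSearch fs defc fuel lo hi ≤ hi ∧
      nfS fs (nfSearch fs defc fuel lo hi - 1) < defc ∧ defc ≤ nfS fs (nfSearch fs defc fuel lo hi) := by
  intro fuel
  induction fuel with
  | zero => intro lo hi h0 hlh hf hlo hhi; omega
  | succ fuel ih =>
      intro lo hi h0 hlh hf hlo hhi
      by_cases hgap : 1 < hi - lo
      · have hmid1 : lo + 1 ≤ PySem.Int.floordiv (lo + hi) 2 := by
          rw [PySem.Int.le_floordiv_iff_mul_le (by omega)]; omega
        have hmid2 : PySem.Int.floordiv (lo + hi) 2 < hi := by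
          rw [PySem.Int.floordiv_lt_iff_lt_mul (by omega)]; omega
        simp only [nfSearch, hgap, if_true]
        by_cases hc : defc ≤ nfS fs (PySem.Int.floordiv (lo + hi) 2)
        · simp only [hc, if_true]
          have := ih lo (PySem.Int.floordiv (lo + hi) 2) h0 (by omega) (by omega) hlo hc
          omega
        · simp only [hc, if_false]
          have := ih (PySem.Int.floordiv (lo + hi) 2) hi (by omega) (by omega) (by omega) (by omega) hhi
          omega
      · have : hi - lo = 1 := by omega
        have hhl : hi - 1 = lo := by omega
        simp only [nfSearch, hgap, if_false]
        refine ⟨by omega, by omega, ?_, hhi⟩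
        rw [hhl]; exact hlo

theorem length_nfDecAt (fs cut : List Int) : (nfDecAt fs cut).length = fs.length := by
  simp [nfDecAt, PySem.List.length_enumerate]

theorem getElem_nfDecAt (fs cut : List Int) (j : Nat) (hj : j < fs.length) :
    (nfDecAt fs cut)[j]'(by rw [length_nfDecAt]; exact hj) =
      if ((j : Int)) ∈ cut then fs[j] - 1 else fs[j] := by
  simp [nfDecAt, PySem.List.getElem_enumerate]

theorem nfDecAt_nil (fs : List Int) : nfDecAt fs [] = fs := by
  apply List.ext_getElem (by simp [length_nfDecAt])
  intro j h1 h2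
  rw [getElem_nfDecAt fs [] j h2]
  simp

theorem nfDecAt_set (fs : List Int) (i : Int) (cut : List Int)
    (h0 : 0 ≤ i) (hlt : i < (fs.length : Int)) (hni : i ∉ cut) :
    nfDecAt (PySem.List.pySetD fs i (PySem.List.pyGetD fs i 0 - 1)) cut = nfDecAt fs (i :: cut) := by
  have hset : PySem.List.pySetD fs i (PySem.List.pyGetD fs i 0 - 1) = fs.set i.toNat (PySem.List.pyGetD fs i 0 - 1) :=
    PySem.List.pySetD_of_nonneg fs _ h0
  have hget : PySem.List.pyGetD fs i 0 = fs[i.toNat]'(by omega) :=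
    PySem.List.pyGetD_eq_getElem fs 0 h0 hlt
  apply List.ext_getElem (by simp [length_nfDecAt, hset])
  intro j h1 h2
  have hjlen : j < fs.length := by
    have := h1; rwa [length_nfDecAt, hset, List.length_set] at this
  rw [getElem_nfDecAt _ cut j (by rw [hset, List.length_set]; omega),
      getElem_nfDecAt fs (i :: cut) j hjlen]
  rw [List.getElem_of_eq hset]
  by_cases hji : j = i.toNat
  · have heq : ((j : Int)) = i := by omega
    have hv : (fs.set i.toNat (PySem.List.pyGetD fs i 0 - 1))[j]'(by rw [List.length_set]; exact hjlen) = fs[j]'hjlen - 1 := by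
      simp [hji, List.getElem_set, hget]
    rw [if_neg (by rw [heq]; exact hni), if_pos (by simp [heq]), hv]
  · have hne : ((j : Int)) ≠ i := by omega
    have hv : (fs.set i.toNat (PySem.List.pyGetD fs i 0 - 1))[j]'(by rw [List.length_set]; exact hjlen) = fs[j]'hjlen := by
      simp [List.getElem_set, Ne.symm hji]
    rw [hv]
    by_cases hc : ((j : Int)) ∈ cut
    · rw [if_pos hc, if_pos (by simp [hc])]
    · rw [if_neg hc, if_neg (by simp [hne, hc])]

theorem nfCut_congr : ∀ (rest : List Int) (fs : List Int) (i v r : Int),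
    0 ≤ i → i < (fs.length : Int) → i ∉ rest → (∀ j ∈ rest, 0 ≤ j) →
    nfCut rest (PySem.List.pySetD fs i v) r = nfCut rest fs r := by
  intro rest
  induction rest with
  | nil => intros; rfl
  | cons j t ih =>
      intro fs i v r h0 hlt hni hpos
      have hji : j ≠ i := by intro h; exact hni (by simp [h])
      have hj0 : 0 ≤ j := hpos j (by simp)
      have hget : PySem.List.pyGetD (PySem.List.pySetD fs i v) j 0 = PySem.List.pyGetD fs j 0 := by
        have h1 : i = ((i.toNat : Nat) : Int) := by omega
        have h2 : j = ((j.toNat : Nat) : Int) := by omega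
        rw [h1, h2, PySem.List.pyGetD_pySetD_natCast fs i.toNat j.toNat v 0 (by omega)]
        have : j.toNat ≠ i.toNat := by omega
        simp [this]
      have ht : i ∉ t := fun h => hni (by simp [h])
      have htpos : ∀ x ∈ t, 0 ≤ x := fun x hx => hpos x (by simp [hx])
      simp only [nfCut, hget]
      split_ifs <;> simp [ih fs i v _ h0 hlt ht htpos]

theorem mem_nfCut : ∀ (order fs : List Int) (r x : Int), x ∈ nfCut order fs r → x ∈ order := by
  intro order
  induction order with
  | nil => intro fs r x h; simp [nfCut] at h
  | cons j t ih =>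
      intro fs r x h
      simp only [nfCut] at h
      split_ifs at h with h1 h2
      · simp at h; simp [h]
      · rcases List.mem_cons.mp h with h | h
        · simp [h]
        · exact List.mem_cons_of_mem _ (ih fs _ x h)
      · exact List.mem_cons_of_mem _ (ih fs r x h)

theorem pass_eq : ∀ (order fs : List Int) (defc : Int) (c : Bool),
    order.Nodup → (∀ i ∈ order, 0 ≤ i ∧ i < (fs.length : Int)) → 1 ≤ defc →
    nfInner order fs defc c =
      (nfDecAt fs (nfCut order fs defc),
       defc - min defc ((order.countP (fun i => 1 < PySem.List.pyGetD fs i 0) : Nat) : Int),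
       c || decide (0 < min defc ((order.countP (fun i => 1 < PySem.List.pyGetD fs i 0) : Nat) : Int))) := by
  intro order
  induction order with
  | nil =>
      intro fs defc c _ _ hd
      simp [nfInner, nfCut, nfDecAt_nil]
      omega
  | cons idx rest ih =>
      intro fs defc c hnd hval hd
      have hidx := hval idx (by simp)
      have hrest : ∀ i ∈ rest, 0 ≤ i ∧ i < (fs.length : Int) := fun i hi => hval i (by simp [hi])
      have hndr : rest.Nodup := (List.nodup_cons.mp hnd).2
      have hnir : idx ∉ rest := (List.nodup_cons.mp hnd).1
      by_cases he : 1 < PySem.List.pyGetD fs idx 0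
      · -- eligible head
        set fs' := PySem.List.pySetD fs idx (PySem.List.pyGetD fs idx 0 - 1) with hfs'
        have hlen' : fs'.length = fs.length := PySem.List.length_pySetD fs idx _
        have hcnt : rest.countP (fun i => 1 < PySem.List.pyGetD fs' i 0) =
            rest.countP (fun i => 1 < PySem.List.pyGetD fs i 0) := by
          apply List.countP_congr
          intro j hj
          have hji : j ≠ idx := fun h => hnir (h ▸ hj)
          have hj0 := (hrest j hj).1
          have h1 : idx = ((idx.toNat : Nat) : Int) := by omega
          have h2 : j = ((j.toNat : Nat) : Int) := by omega
          rw [hfs', h1, h2, PySem.List.pyGetD_pySetD_natCast fs idx.toNat j.toNat _ 0 (by omega)]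
          have : j.toNat ≠ idx.toNat := by omega
          simp [this]
        by_cases hstop : defc - 1 = 0
        · -- defc = 1: break
          have hd1 : defc = 1 := by omega
          have hcuts : nfCut (idx :: rest) fs defc = [idx] := by
            simp only [nfCut, he, if_true, hd1, if_pos rfl]
          have h1 : PySem.List.pySetD fs idx (PySem.List.pyGetD fs idx 0 - 1) = nfDecAt fs (nfCut (idx :: rest) fs defc) := by
            rw [hcuts, ← nfDecAt_set fs idx [] hidx.1 hidx.2 (by simp), nfDecAt_nil]
          have hcntpos : 0 < (idx :: rest).countP (fun i => 1 < PySem.List.pyGetD fs i 0) := by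
            simp [List.countP_cons, he]
          have hmin : min defc (((idx :: rest).countP (fun i => 1 < PySem.List.pyGetD fs i 0) : Nat) : Int) = 1 := by
            rw [hd1]; push_cast; omega
          simp only [nfInner, he, if_true, hstop, if_pos rfl]
          refine Prod.ext ?_ (Prod.ext ?_ ?_)
          · simpa using h1
          · simp only []; omega
          · simp [hmin]
        · -- continue with defc - 1
          simp only [nfInner, he, if_true, hstop, if_false]
          rw [ih fs' (defc - 1) true hndr (by rw [hlen']; exact hrest) (by omega)]
          have hcut : nfCut rest fs' (defc - 1) = nfCut rest fs (defc - 1) :=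
            nfCut_congr rest fs idx _ _ hidx.1 hidx.2 hnir (fun j hj => (hrest j hj).1)
          have hcuthead : nfCut (idx :: rest) fs defc = idx :: nfCut rest fs (defc - 1) := by
            simp only [nfCut, he, if_true]
            rw [if_neg (by omega : ¬defc = 1)]
          have hni_cut : idx ∉ nfCut rest fs (defc - 1) := fun h => hnir (mem_nfCut rest fs _ idx h)
          rw [hcut, hcuthead]
          rw [show nfDecAt fs' (nfCut rest fs (defc - 1)) = nfDecAt fs (idx :: nfCut rest fs (defc - 1)) from
            nfDecAt_set fs idx _ hidx.1 hidx.2 hni_cut]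
          have hcc : (idx :: rest).countP (fun i => 1 < PySem.List.pyGetD fs i 0) =
              rest.countP (fun i => 1 < PySem.List.pyGetD fs i 0) + 1 := by
            simp [List.countP_cons, he]
          rw [hcnt, hcc]
          have hminh : defc - 1 - min (defc - 1) ((rest.countP (fun i => 1 < PySem.List.pyGetD fs i 0) : Nat) : Int) =
              defc - min defc (((rest.countP (fun i => 1 < PySem.List.pyGetD fs i 0) + 1 : Nat) : Nat) : Int) := by
            push_cast; omega
          have hminb : (true || decide (0 < min (defc - 1) ((rest.countP (fun i => 1 < PySem.List.pyGetD fs i 0) : Nat) : Int))) =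
              (c || decide (0 < min defc (((rest.countP (fun i => 1 < PySem.List.pyGetD fs i 0) + 1 : Nat) : Nat) : Int))) := by
            have : (0 : Int) < min defc (((rest.countP (fun i => 1 < PySem.List.pyGetD fs i 0) + 1 : Nat) : Nat) : Int) := by
              push_cast; omega
            simp [this]
            exact Or.inr (by omega)
          rw [hminh, hminb]
      · -- ineligible head
        have hcc : (idx :: rest).countP (fun i => 1 < PySem.List.pyGetD fs i 0) =
            rest.countP (fun i => 1 < PySem.List.pyGetD fs i 0) := by
          simp [List.countP_cons, he]
        simp only [nfInner, he, if_false, nfCut, hcc]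
        exact ih fs defc c hndr hrest hd

theorem nfCut_all : ∀ (order fs : List Int) (defc : Int),
    ((order.countP (fun i => 1 < PySem.List.pyGetD fs i 0) : Nat) : Int) ≤ defc → 1 ≤ defc →
    nfCut order fs defc = order.filter (fun i => 1 < PySem.List.pyGetD fs i 0) := by
  intro order
  induction order with
  | nil => intros; rfl
  | cons idx rest ih =>
      intro fs defc hle hd
      by_cases he : 1 < PySem.List.pyGetD fs idx 0
      · have hcc : (idx :: rest).countP (fun i => 1 < PySem.List.pyGetD fs i 0) =
            rest.countP (fun i => 1 < PySem.List.pyGetD fs i 0) + 1 := by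
          simp [List.countP_cons, he]
        rw [hcc] at hle
        by_cases h1 : defc = 1
        · have hz : rest.countP (fun i => 1 < PySem.List.pyGetD fs i 0) = 0 := by
            push_cast at hle; omega
          have hfil : rest.filter (fun i => 1 < PySem.List.pyGetD fs i 0) = [] :=
            List.filter_eq_nil_iff.mpr (List.countP_eq_zero.mp hz)
          simp only [nfCut, he, if_true, h1, if_pos rfl]
          rw [List.filter_cons_of_pos (by simp [he]), hfil]
        · simp only [nfCut, he, if_true, h1, if_false]
          rw [List.filter_cons_of_pos (by simp [he]),
            ih fs (defc - 1) (by push_cast at hle ⊢; omega) (by omega)]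
      · have hcc : (idx :: rest).countP (fun i => 1 < PySem.List.pyGetD fs i 0) =
            rest.countP (fun i => 1 < PySem.List.pyGetD fs i 0) := by
          simp [List.countP_cons, he]
        simp only [nfCut, he, if_false]
        rw [List.filter_cons_of_neg (by simp [he])]
        exact ih fs defc (by rw [hcc] at hle; exact hle) hd

theorem countP_order_eq (order fs : List Int)
    (hperm : order.Perm (PySem.List.pyRange 0 (fs.length : Int) 1)) :
    order.countP (fun i => 1 < PySem.List.pyGetD fs i 0) = fs.countP (fun f => 1 < f) := by
  have h1 : order.countP (fun i => 1 < PySem.List.pyGetD fs i 0) =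
      (order.map (fun i => PySem.List.pyGetD fs i 0)).countP (fun f => 1 < f) := by
    rw [List.countP_map]; rfl
  have h2 : (order.map (fun i => PySem.List.pyGetD fs i 0)).Perm
      ((PySem.List.pyRange 0 (fs.length : Int) 1).map (fun i => PySem.List.pyGetD fs i 0)) :=
    hperm.map _
  have h3 : (PySem.List.pyRange 0 (fs.length : Int) 1).map (fun j => PySem.List.pyGetD fs j 0) = fs := by
    simpa [PySem.List.len] using PySem.List.map_pyGetD_pyRange_zero fs 0
  rw [h1, h2.countP_eq, h3]

theorem decAt_full (order fs : List Int) (defc : Int)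
    (hperm : order.Perm (PySem.List.pyRange 0 (fs.length : Int) 1))
    (he : ((order.countP (fun i => 1 < PySem.List.pyGetD fs i 0) : Nat) : Int) ≤ defc) (hd : 1 ≤ defc) :
    nfDecAt fs (nfCut order fs defc) = fs.map (fun f => if 1 < f then f - 1 else f) := by
  rw [nfCut_all order fs defc he hd]
  apply List.ext_getElem (by simp [length_nfDecAt])
  intro j h1 h2
  have hjlen : j < fs.length := by rwa [length_nfDecAt] at h1
  rw [getElem_nfDecAt fs _ j hjlen]
  have hmem : ((j : Int)) ∈ order.filter (fun i => 1 < PySem.List.pyGetD fs i 0) ↔ 1 < fs[j] := by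
    rw [List.mem_filter]
    constructor
    · rintro ⟨-, hp⟩
      have := PySem.List.pyGetD_eq_getElem fs (i := (j : Int)) 0 (by omega) (by push_cast; omega)
      rw [this] at hp
      simpa using hp
    · intro hgt
      refine ⟨?_, ?_⟩
      · rw [hperm.mem_iff, PySem.List.mem_pyRange_one]
        constructor <;> [omega; (push_cast; omega)]
      · have := PySem.List.pyGetD_eq_getElem fs (i := (j : Int)) 0 (by omega) (by push_cast; omega)
        rw [this]; simpa using hgt
  by_cases hel : 1 < fs[j]
  · rw [if_pos (hmem.mpr hel)]
    simp [hel]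
  · rw [if_neg (fun h => hel (hmem.mp h))]
    simp [hel]

theorem outer_closed : ∀ (fuel : Nat) (fs : List Int) (defc k : Int) (order : List Int),
    order.Perm (PySem.List.pyRange 0 (fs.length : Int) 1) →
    (∀ f ∈ fs, 1 ≤ f) →
    1 ≤ defc → 1 ≤ k → nfS fs (k - 1) < defc → defc ≤ nfS fs k →
    defc.toNat < fuel →
    nfOuter order fuel fs defc =
      nfDecAt (fs.map (fun f => f - min (k - 1) (f - 1)))
        (nfCut order (fs.map (fun f => f - min (k - 1) (f - 1))) (defc - nfS fs (k - 1))) := by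
  intro fuel
  induction fuel with
  | zero => intro fs defc k order _ _ hd _ _ _ hfuel; omega
  | succ fuel ih =>
      intro fs defc k order hperm hall hd hk hklo hkhi hfuel
      have hnd : order.Nodup := hperm.nodup_iff.mpr (PySem.List.nodup_pyRange_one 0 _)
      have hval : ∀ i ∈ order, 0 ≤ i ∧ i < (fs.length : Int) := by
        intro i hi
        have := hperm.mem_iff.mp hi
        rw [PySem.List.mem_pyRange_one] at this
        exact this
      have hcnt := countP_order_eq order fs hperm
      have hS1 : nfS fs 1 = ((order.countP (fun i => 1 < PySem.List.pyGetD fs i 0) : Nat) : Int) := by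
        rw [nfS_one fs hall, hcnt]
      simp only [nfOuter, if_pos (by omega : (0:Int) < defc)]
      rw [pass_eq order fs defc false hnd hval hd]
      by_cases hk1 : defc ≤ nfS fs 1
      · -- final (possibly partial) pass: k must be 1
        have hmin : min defc ((order.countP (fun i => 1 < PySem.List.pyGetD fs i 0) : Nat) : Int) = defc := by
          rw [← hS1]; omega
        have hchg : decide ((0:Int) < defc) = true := by simp; omega
        simp only [hmin, hchg, Bool.false_or, if_pos rfl, sub_self]
        have hres : nfOuter order fuel (nfDecAt fs (nfCut order fs defc)) 0 = nfDecAt fs (nfCut order fs defc) := by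
          cases fuel with
          | zero => omega
          | succ f => simp [nfOuter]
        rw [hres]
        -- k = 1 since nfS fs (k-1) < defc ≤ nfS fs 1 and nfS monotone
        have hkeq : k = 1 := by
          by_contra hne
          have hk2 : 2 ≤ k := by omega
          have := nfS_mono fs 1 (k - 1) (by omega) (by omega)
          omega
        subst hkeq
        simp only [sub_self]
        have hz := nfS_zero fs hall
        have hmap : fs.map (fun f => f - min 0 (f - 1)) = fs := by
          apply List.map_congr_left ?_ |>.trans (List.map_id fs)
          intro f hf
          have := hall f hf
          simp; omega
        rw [hz, hmap]
        simp only [sub_zero, if_true]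
      · -- a full pass, recurse
        have hm : ((order.countP (fun i => 1 < PySem.List.pyGetD fs i 0) : Nat) : Int) < defc := by omega
        have hmin : min defc ((order.countP (fun i => 1 < PySem.List.pyGetD fs i 0) : Nat) : Int) =
            nfS fs 1 := by rw [← hS1]; omega
        -- e > 0: otherwise nfS fs k = 0 (all entries are 1) contradicting defc ≤ nfS fs k
        have hepos : 0 < nfS fs 1 := by
          by_contra hz
          have he0 : fs.countP (fun f => 1 < f) = 0 := by
            have := nfS_one fs hall; omega
          have hallone : ∀ f ∈ fs, f = 1 := by
            intro f hf
            have h1 := hall f hf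
            have := List.countP_eq_zero.mp he0 f hf
            simp at this
            omega
          have hSk : nfS fs k = 0 := by
            unfold nfS
            rw [List.sum_eq_zero]
            intro x hx
            rcases List.mem_map.mp hx with ⟨f, hf, rfl⟩
            rw [hallone f hf]
            simp; omega
          omega
        have hchg : decide ((0:Int) < min defc ((order.countP (fun i => 1 < PySem.List.pyGetD fs i 0) : Nat) : Int)) = true := by
          rw [hmin]; simp; omega
        simp only [hchg, Bool.false_or, if_pos rfl, hmin]
        rw [decAt_full order fs defc hperm (by omega) hd, applyOne_eq fs hall]
        set fs' := fs.map (fun f => f - min 1 (f - 1)) with hfs'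
        have hall' : ∀ f ∈ fs', 1 ≤ f := by
          intro f hf
          rcases List.mem_map.mp hf with ⟨g, hg, rfl⟩
          have := hall g hg
          simp; omega
        have hlen' : fs'.length = fs.length := by simp [hfs']
        have hperm' : order.Perm (PySem.List.pyRange 0 (fs'.length : Int) 1) := by rwa [hlen']
        have hk2 : 2 ≤ k := by
          rcases lt_or_ge k 2 with h | h
          · exfalso
            have hk1' : k = 1 := by omega
            rw [hk1'] at hkhi
            exact hk1 hkhi
          · exact h
        have hS' : ∀ m : Int, 0 ≤ m → nfS fs' m = nfS fs (m + 1) - nfS fs 1 :=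
          fun m hm' => nfS_applyOne fs hall m hm'
        have e1 : k - 1 - 1 + 1 = k - 1 := by ring
        have e2 : k - 1 + 1 = k := by ring
        have hfuel2 : (defc - nfS fs 1).toNat < fuel := by omega
        have hklo' : nfS fs' (k - 1 - 1) < defc - nfS fs 1 := by
          rw [hS' (k - 1 - 1) (by omega), e1]; omega
        have hkhi' : defc - nfS fs 1 ≤ nfS fs' (k - 1) := by
          rw [hS' (k - 1) (by omega), e2]; omega
        have hrec := ih fs' (defc - nfS fs 1) (k - 1) order hperm' hall' (by omega) (by omega) hklo' hkhi' hfuel2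
        rw [hrec]
        have hbase : fs'.map (fun f => f - min (k - 1 - 1) (f - 1)) = fs.map (fun f => f - min (k - 1) (f - 1)) := by
          rw [hfs', List.map_map]
          apply List.map_congr_left
          intro f hf
          have := hall f hf
          simp only [Function.comp_apply]
          omega
        have hrem : defc - nfS fs 1 - nfS fs' (k - 1 - 1) = defc - nfS fs (k - 1) := by
          rw [hS' (k - 1 - 1) (by omega), e1]; omega
        rw [hbase, hrem]
        simp only [show decide (0 < nfS fs 1) = true by simpa using hepos, if_true]

-- ===== VERDICT (by name: the statement is the Claim_ definition above) =====
theorem normalise_frequencies_py_spec : Claim_equal_normalise_frequencies_py := by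
  unfold Claim_equal_normalise_frequencies_py
  intro counts precision _hDom hPre
  unfold Spec_normalise_frequencies_py
  obtain ⟨hsum, hprec, hbits⟩ := hPre
  unfold normalise_frequencies_py normalise_frequencies_py_alt
  simp only []
  rw [if_neg hsum, if_neg hsum]
  set target : Int := (1 : Int) <<< precision.toNat with htarget
  set freqs := counts.map (fun count => max 1 (PySem.Int.floordiv (count * target) counts.sum)) with hfreqs
  -- basic facts
  have hcne : counts ≠ [] := by intro h; rw [h] at hsum; exact hsum rfl
  have hfne : freqs ≠ [] := by
    rw [hfreqs]; intro h
    exact hcne (List.map_eq_nil_iff.mp h)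
  have hLpos : 0 < freqs.length := List.length_pos_of_ne_nil hfne
  have hall : ∀ f ∈ freqs, 1 ≤ f := by
    intro f hf
    rw [hfreqs] at hf
    rcases List.mem_map.mp hf with ⟨c, _, rfl⟩
    exact le_max_left 1 _
  have htpow : target = ((2 ^ precision.toNat : Nat) : Int) := by
    rw [htarget, Int.shiftLeft_eq]; push_cast; ring
  have hlen_le : (freqs.length : Int) ≤ target := by
    have hlc : freqs.length = counts.length := by rw [hfreqs]; simp
    have hL1 : 1 ≤ counts.length := by
      rcases counts with _ | ⟨c, t⟩
      · exact absurd rfl hcne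
      · simp
    have hnatabs : ((counts.length : Int) - 1).natAbs = counts.length - 1 := by omega
    have hlt := PySem.Int.lt_two_pow_bitLength ((counts.length : Int) - 1)
    rw [hnatabs] at hlt
    have hmono : (2 : Nat) ^ PySem.Int.bitLength ((counts.length : Int) - 1) ≤ 2 ^ precision.toNat :=
      Nat.pow_le_pow_right (by omega) hbits
    have : counts.length ≤ 2 ^ precision.toNat := by omega
    rw [htpow, hlc]
    exact_mod_cast this
  by_cases hcur : freqs.sum = target
  · rw [if_pos hcur, if_pos hcur]
  · rw [if_neg hcur, if_neg hcur]
    by_cases hlt : freqs.sum < target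
    · -- increment branch: closed form
      rw [if_pos hlt, if_pos hlt]
      exact inc_closed freqs (target - freqs.sum) (by omega) hfne
    · -- deficit branch
      rw [if_neg hlt, if_neg hlt]
      have hnotlt : ¬(target < (freqs.length : Int)) := by omega
      rw [if_neg hnotlt]
      set deficit := freqs.sum - target with hdefc
      have hd1 : 1 ≤ deficit := by omega
      -- max(freqs)
      obtain ⟨m, hm⟩ : ∃ m, PySem.List.max? freqs (fun y => y) = some m := by
        rcases h : PySem.List.max? freqs (fun y => y) with _ | m
        · exact absurd ((PySem.List.max?_eq_none_iff freqs _).mp h) hfne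
        · exact ⟨m, rfl⟩
      have hmmem : m ∈ freqs := PySem.List.max?_mem hm
      have hm1 : 1 ≤ m := hall m hmmem
      have hmax : ∀ f ∈ freqs, f ≤ m := PySem.List.max?_isMax hm
      rw [hm]
      simp only [Option.getD_some]
      -- binary-search bracket
      have hS0 : nfS freqs 0 = 0 := nfS_zero freqs hall
      have hSmax : nfS freqs m = freqs.sum - (freqs.length : Int) := nfS_max freqs m hmax
      have hsearch := search_spec freqs deficit (m - 0).toNat 0 m le_rfl (by omega)
        (by omega) (by omega) (by rw [hSmax]; omega)
      set k := nfSearch freqs deficit (m - 0).toNat 0 m with hk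
      obtain ⟨hkpos, _hkle, hklo, hkhi⟩ := hsearch
      -- permutation of indices
      have hperm : (PySem.List.sorted (PySem.List.pyRange 0 ((freqs.length : Int)) 1)
          (fun i => PySem.List.pyGetD freqs i 0) true).Perm
            (PySem.List.pyRange 0 ((freqs.length : Int)) 1) :=
        PySem.List.sorted_perm _ _ _
      exact outer_closed (deficit.toNat + 1) freqs deficit k _ hperm hall hd1 (by omega) hklo hkhi (by omega)
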